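-- pv_equiv track=rewrite | github.com/FrankFrankerson/AdventOfCode | 2023/Dag 3/day3.py | findPartNr
-- ===== SOURCE A (Python) =====
-- def findPartNr(lines, activeMatrix):
--     partNr = {}
--     for i, line in enumerate(lines):
--         line = line.strip('\n')
--         number = ''
--         addNumber = False
--         for j, s in enumerate(line):
--             if s in '0123456789':
--                 number += s
--                 if j in activeMatrix[i]:
--                     addNumber=True
--             elif number and addNumber:
--                 if i in partNr:
--                     partNr[i].append(int(number))
--                 else:
--                     partNr[i] = [int(number)]
--                 addNumber = False
--                 number = ''
--             else:
--                 number = ''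
--         if number and addNumber:
--             if i in partNr:
--                 partNr[i].append(int(number))
--             else:
--                 partNr[i] = [int(number)]
--     return partNr
-- ===== SOURCE B (Python) =====
-- def findPartNr(lines, activeMatrix):
--     # Tokenize each line into maximal digit runs with their spans, then keep the
--     # runs that touch an active column (instead of A's per-character state machine).
--     partNr = {}
--     for i, line in enumerate(lines):
--         line = line.strip('\n')
--         j = 0
--         n = len(line)
--         while j < n:
--             if line[j] in '0123456789':
--                 start = j
--                 while j < n and line[j] in '0123456789':
--                     j += 1
--                 if any(k in activeMatrix[i] for k in range(start, j)):
--                     partNr.setdefault(i, []).append(int(line[start:j]))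
--             else:
--                 j += 1
--     return partNr
-- ===== Notes on version B (the rewrite author's own statement) =====
-- stated objective: alternative
-- what changed: Replaces A's per-character number/addNumber state machine with a tokenizer that extracts each maximal digit run with its span and then keeps the run iff any position of its span is an active column.
import Mathlib
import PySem

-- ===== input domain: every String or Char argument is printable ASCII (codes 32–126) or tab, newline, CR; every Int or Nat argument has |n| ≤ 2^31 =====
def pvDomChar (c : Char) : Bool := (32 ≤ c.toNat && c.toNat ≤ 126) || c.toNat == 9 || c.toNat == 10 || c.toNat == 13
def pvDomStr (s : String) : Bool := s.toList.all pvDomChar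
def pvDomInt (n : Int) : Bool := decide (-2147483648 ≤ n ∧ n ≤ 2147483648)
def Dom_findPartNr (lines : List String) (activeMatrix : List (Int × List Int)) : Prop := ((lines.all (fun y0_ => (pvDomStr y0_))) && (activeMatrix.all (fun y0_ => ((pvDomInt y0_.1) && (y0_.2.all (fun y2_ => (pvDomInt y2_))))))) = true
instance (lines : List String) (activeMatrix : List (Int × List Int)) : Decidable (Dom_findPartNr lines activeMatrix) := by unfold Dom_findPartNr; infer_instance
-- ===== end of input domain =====

-- B replaces A's per-character number/addNumber state machine by a tokenizer that
-- extracts each maximal digit run with its span and then tests the span against the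
-- active columns (objective: alternative decomposition, same asymptotic cost).

-- shared small helpers (used by both ports)
def pvDigits : List Char := ['0','1','2','3','4','5','6','7','8','9']  -- the string '0123456789'
def pvIsDig (c : Char) : Bool := pvDigits.contains c                   -- s in '0123456789'
def pvIntOf (num : List Char) : Int := (PySem.Int.ofChars? num).getD 0 -- int(number); only evaluated on nonempty digit runs, where int() returns

-- ===== PORT A =====
-- partNr[i].append(v) / partNr[i] = [v] guarded by 'i in partNr'
def pvPush (d : PySem.Dict Int (List Int)) (i v : Int) : PySem.Dict Int (List Int) :=
  if d.contains i then d.modify i [] (fun l => l ++ [v]) else d.insert i [v]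

-- the inner 'for j, s in enumerate(line)' loop plus the trailing flush, with A's state
-- (partNr, number, addNumber); 'j in activeMatrix[i]' is act.contains j (act = activeMatrix[i],
-- totalized with [] — Pre_ excludes the KeyError inputs where the key i is absent)
def pvALoop (i : Int) (act : List Int) (cs : List Char) (j : Int)
    (d : PySem.Dict Int (List Int)) (num : List Char) (add : Bool) : PySem.Dict Int (List Int) :=
  match cs with
  | [] => if !num.isEmpty && add then pvPush d i (pvIntOf num) else d
  | c :: cs' =>
    if pvIsDig c then
      pvALoop i act cs' (j + 1) d (num ++ [c]) (if act.contains j then true else add)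
    else if !num.isEmpty && add then
      pvALoop i act cs' (j + 1) (pvPush d i (pvIntOf num)) [] false
    else
      pvALoop i act cs' (j + 1) d [] add

-- the outer 'for i, line in enumerate(lines)' loop; line.strip('\n') is stripChars
def pvAOuter (am : PySem.Dict Int (List Int)) (lines : List String) (i : Int)
    (d : PySem.Dict Int (List Int)) : PySem.Dict Int (List Int) :=
  match lines with
  | [] => d
  | l :: ls =>
      pvAOuter am ls (i + 1)
        (pvALoop i ((am.get? i).getD []) (PySem.Chars.stripChars l.toList ['\n']) 0 d [] false)

def findPartNr (lines : List String) (activeMatrix : List (Int × List Int)) : List (Int × List Int) :=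
  (pvAOuter (PySem.Dict.ofList activeMatrix) lines 0 PySem.Dict.empty).items

-- ===== PORT B =====
-- Source B's tokenizer: scan the line left to right; at a digit, consume the whole maximal
-- digit run (the inner while) and emit (start, end, int(run)); else advance one position
def pvTokens (cs : List Char) (j : Int) : List (Int × Int × Int) :=
  match cs with
  | [] => []
  | c :: cs' =>
    if pvIsDig c then
      let run := cs'.takeWhile pvIsDig
      let rest := cs'.dropWhile pvIsDig
      (j, j + 1 + run.length, pvIntOf (c :: run)) :: pvTokens rest (j + 1 + run.length)
    else pvTokens cs' (j + 1)
termination_by cs.length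
decreasing_by
  · simpa using Nat.lt_succ_of_le (List.length_dropWhile_le _ cs')
  · simp

-- any(k in activeMatrix[i] for k in range(start, end))
def pvCond (act : List Int) (a b : Int) : Bool := (PySem.List.pyRange a b 1).any (fun k => act.contains k)

-- per line: for each token keep it iff its span touches an active column;
-- partNr.setdefault(i, []).append(v) is modify i [] (· ++ [v])
def pvBLine (i : Int) (act : List Int) (d : PySem.Dict Int (List Int)) (cs : List Char) :
    PySem.Dict Int (List Int) :=
  (pvTokens cs 0).foldl
    (fun d t => if pvCond act t.1 t.2.1 then d.modify i [] (fun l => l ++ [t.2.2]) else d) d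

def pvBOuter (am : PySem.Dict Int (List Int)) (lines : List String) (i : Int)
    (d : PySem.Dict Int (List Int)) : PySem.Dict Int (List Int) :=
  match lines with
  | [] => d
  | l :: ls =>
      pvBOuter am ls (i + 1)
        (pvBLine i ((am.get? i).getD []) d (PySem.Chars.stripChars l.toList ['\n']))

def findPartNr_alt (lines : List String) (activeMatrix : List (Int × List Int)) : List (Int × List Int) :=
  (pvBOuter (PySem.Dict.ofList activeMatrix) lines 0 PySem.Dict.empty).items

-- ===== PRECONDITION & SPEC =====
-- Pre_ excludes exactly the inputs where A raises KeyError: a line whose stripped text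
-- contains a digit while its index is not a key of activeMatrix (B raises there too).
def Pre_findPartNr (lines : List String) (activeMatrix : List (Int × List Int)) : Prop :=
  ∀ k ∈ List.range lines.length,
    ((PySem.Chars.stripChars ((lines.getD k "").toList) ['\n']).any pvIsDig) = true →
    (PySem.Dict.ofList activeMatrix).contains (k : Int) = true
instance (lines : List String) (activeMatrix : List (Int × List Int)) : Decidable (Pre_findPartNr lines activeMatrix) := by unfold Pre_findPartNr; infer_instance

def pvWitness_findPartNr : List String × (List (Int × List Int)) :=
  (["467*.", "..#35"], [(0, [3]), (1, [2, 3])])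

def Spec_findPartNr (lines : List String) (activeMatrix : List (Int × List Int)) (out : List (Int × List Int)) : Prop := out = findPartNr_alt lines activeMatrix
instance (lines : List String) (activeMatrix : List (Int × List Int)) (out : List (Int × List Int)) : Decidable (Spec_findPartNr lines activeMatrix out) := by unfold Spec_findPartNr; infer_instance

-- ===== CLAIM (what is proved, stated in full; the proofs are below) =====
def Claim_equal_findPartNr : Prop := ∀ (lines : List String) (activeMatrix : List (Int × List Int)), Dom_findPartNr lines activeMatrix → Pre_findPartNr lines activeMatrix → Spec_findPartNr lines activeMatrix (findPartNr lines activeMatrix)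

-- ===== LEMMAS AND PROOFS =====

-- A's two-branch dict update is exactly B's modify-with-default
theorem pvPush_eq_modify (d : PySem.Dict Int (List Int)) (i v : Int) :
    pvPush d i v = d.modify i [] (fun l => l ++ [v]) := by
  unfold pvPush
  split
  · rfl
  · rename_i h
    have hc : d.contains i = false := by simpa using h
    have hg : d.getD i [] = [] := by
      simp [PySem.Dict.getD, (PySem.Dict.get?_eq_none_iff_contains d i).2 hc]
    simp [PySem.Dict.modify, hg]

-- the values A's state machine appends for one line, as a list (state-machine form)
def pvGTok (act : List Int) (cs : List Char) (j : Int) (num : List Char) (add : Bool) : List Int :=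
  match cs with
  | [] => if !num.isEmpty && add then [pvIntOf num] else []
  | c :: cs' =>
    if pvIsDig c then
      pvGTok act cs' (j + 1) (num ++ [c]) (if act.contains j then true else add)
    else if !num.isEmpty && add then
      pvIntOf num :: pvGTok act cs' (j + 1) [] false
    else
      pvGTok act cs' (j + 1) [] add

-- A's inner loop = folding pvPush over the appended values
theorem pvALoop_eq_foldl (i : Int) (act : List Int) (cs : List Char) :
    ∀ (j : Int) (d : PySem.Dict Int (List Int)) (num : List Char) (add : Bool),
      pvALoop i act cs j d num add = (pvGTok act cs j num add).foldl (fun d v => pvPush d i v) d := by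
  induction cs with
  | nil =>
      intro j d num add
      simp only [pvALoop, pvGTok]
      split <;> simp
  | cons c cs ih =>
      intro j d num add
      simp only [pvALoop, pvGTok]
      split
      · exact ih _ _ _ _
      · split
        · simp [ih]
        · exact ih _ _ _ _

-- swallowing a block of digits
theorem pvGTok_digits (act : List Int) (ds : List Char) :
    ∀ (rest : List Char) (j : Int) (num : List Char) (add : Bool),
      (∀ c ∈ ds, pvIsDig c = true) →
      pvGTok act (ds ++ rest) j num add
        = pvGTok act rest (j + ds.length) (num ++ ds) (add || pvCond act j (j + ds.length)) := by
  induction ds with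
  | nil =>
      intro rest j num add _
      simp [pvCond, PySem.List.pyRange_one_eq_nil (le_refl j)]
  | cons c ds ih =>
      intro rest j num add hall
      have hc : pvIsDig c = true := hall c (by simp)
      simp only [List.cons_append, pvGTok, hc, if_true]
      rw [ih rest (j + 1) (num ++ [c]) _ (fun x hx => hall x (by simp [hx]))]
      rw [show (((c :: ds).length : Nat) : Int) = (ds.length : Int) + 1 by
        simp [List.length_cons]]
      rw [show j + ((ds.length : Int) + 1) = j + 1 + ds.length by omega]
      rw [show num ++ c :: ds = (num ++ [c]) ++ ds by simp]
      rw [show ((if act.contains j then true else add) || pvCond act (j + 1) (j + 1 + ds.length))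
            = (add || pvCond act j (j + 1 + ds.length)) by
        have hlt : j < j + 1 + (ds.length : Int) := by omega
        rw [show pvCond act j (j + 1 + ds.length)
              = (act.contains j || pvCond act (j + 1) (j + 1 + ds.length)) by
          simp only [pvCond]
          rw [PySem.List.pyRange_one_cons hlt, List.any_cons]]
        cases act.contains j <;> cases add <;> simp]

-- the kept values of B's tokens
def pvAcc (act : List Int) (toks : List (Int × Int × Int)) : List Int :=
  (toks.filter (fun t => pvCond act t.1 t.2.1)).map (fun t => t.2.2)

theorem pvGTok_eq_acc (act : List Int) :
    ∀ (n : Nat) (cs : List Char) (j : Int), cs.length ≤ n →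
      pvGTok act cs j [] false = pvAcc act (pvTokens cs j) := by
  intro n
  induction n with
  | zero =>
      intro cs j hn
      have : cs = [] := List.eq_nil_of_length_eq_zero (Nat.le_zero.mp hn)
      subst this
      simp [pvGTok, pvTokens, pvAcc]
  | succ n ih =>
      intro cs j hn
      match cs with
      | [] => simp [pvGTok, pvTokens, pvAcc]
      | c :: cs' =>
        by_cases hc : pvIsDig c = true
        · -- digit: the token is the maximal run
          have hsplit : cs'.takeWhile pvIsDig ++ cs'.dropWhile pvIsDig = cs' :=
            List.takeWhile_append_dropWhile
          have htok : pvTokens (c :: cs') j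
              = (j, j + 1 + ((cs'.takeWhile pvIsDig).length : Int),
                  pvIntOf (c :: cs'.takeWhile pvIsDig))
                :: pvTokens (cs'.dropWhile pvIsDig) (j + 1 + (cs'.takeWhile pvIsDig).length) := by
            rw [pvTokens]
            simp only [hc, if_true]
          generalize hrun : cs'.takeWhile pvIsDig = run at *
          generalize hrest : cs'.dropWhile pvIsDig = rest at *
          have hall : ∀ x ∈ (c :: run), pvIsDig x = true := by
            intro x hx
            rcases List.mem_cons.mp hx with h | h
            · subst h; exact hc
            · rw [← hrun] at h; exact List.mem_takeWhile_imp h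
          have hgtok : pvGTok act (c :: cs') j [] false
              = pvGTok act rest (j + 1 + run.length) (c :: run)
                  (pvCond act j (j + 1 + run.length)) := by
            rw [show (c :: cs') = (c :: run) ++ rest by simp [← hsplit]]
            rw [pvGTok_digits act (c :: run) rest j [] false hall]
            rw [show (((c :: run).length : Nat) : Int) = 1 + run.length by
              simp [List.length_cons]; omega]
            rw [show j + (1 + (run.length : Int)) = j + 1 + run.length by omega]
            simp
          rw [hgtok, htok]
          have hrestlen : rest.length ≤ cs'.length := by
            rw [← hrest]; exact List.length_dropWhile_le _ _
          match rest with
          | [] =>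
              simp only [pvGTok, pvTokens, pvAcc, List.filter_cons, List.filter_nil]
              by_cases hcnd : pvCond act j (j + 1 + (run.length : Int)) = true
              · simp [hcnd]
              · simp only [Bool.not_eq_true] at hcnd
                simp [hcnd]
          | r :: rest' =>
              have hrnd : pvIsDig r = false := by
                have := List.head_dropWhile_not pvIsDig (l := cs') (by rw [hrest]; simp)
                simpa [hrest] using this
              have hrl : rest'.length ≤ n := by
                have h1 : (r :: rest').length ≤ cs'.length := hrestlen
                have h2 : cs'.length ≤ n := by simpa using hn
                simp at h1; omega
              have htok2 : pvTokens (r :: rest') (j + 1 + (run.length : Int))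
                  = pvTokens rest' (j + 1 + run.length + 1) := by
                rw [pvTokens]; simp [hrnd]
              by_cases hcnd : pvCond act j (j + 1 + (run.length : Int)) = true
              · simp only [pvGTok, hrnd, Bool.false_eq_true, if_false, List.isEmpty_cons,
                  Bool.not_false, Bool.true_and, hcnd, if_true]
                rw [htok2, ih rest' (j + 1 + run.length + 1) hrl]
                simp [pvAcc, hcnd]
              · simp only [Bool.not_eq_true] at hcnd
                simp only [pvGTok, hrnd, Bool.false_eq_true, if_false, List.isEmpty_cons,
                  Bool.not_false, Bool.true_and, hcnd]
                rw [htok2, ih rest' (j + 1 + run.length + 1) hrl]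
                simp [pvAcc, hcnd]
        · -- non-digit: skip
          have hnd : pvIsDig c = false := by simpa using hc
          have hl : cs'.length ≤ n := by simpa using hn
          have htok : pvTokens (c :: cs') j = pvTokens cs' (j + 1) := by
            rw [pvTokens]; simp [hnd]
          rw [htok]
          simp only [pvGTok, hnd, Bool.false_eq_true, if_false, List.isEmpty_nil, Bool.not_true,
            Bool.false_and]
          simpa using ih cs' (j + 1) hl

-- B's per-line fold = folding pvPush over the kept values
theorem pvBLine_foldl (i : Int) (act : List Int) :
    ∀ (toks : List (Int × Int × Int)) (d : PySem.Dict Int (List Int)),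
      toks.foldl (fun d t => if pvCond act t.1 t.2.1 then d.modify i [] (fun l => l ++ [t.2.2]) else d) d
        = (pvAcc act toks).foldl (fun d v => pvPush d i v) d := by
  intro toks
  induction toks with
  | nil => intro d; simp [pvAcc]
  | cons t ts ih =>
      intro d
      by_cases hcnd : pvCond act t.1 t.2.1 = true
      · simp only [List.foldl_cons, hcnd, if_true]
        rw [← pvPush_eq_modify]
        have hacc : pvAcc act (t :: ts) = t.2.2 :: pvAcc act ts := by
          simp [pvAcc, hcnd]
        rw [hacc, List.foldl_cons]
        exact ih (pvPush d i t.2.2)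
      · simp only [Bool.not_eq_true] at hcnd
        simp only [List.foldl_cons, hcnd, Bool.false_eq_true, if_false]
        have hacc : pvAcc act (t :: ts) = pvAcc act ts := by
          simp [pvAcc, hcnd]
        rw [hacc]
        exact ih d

-- one line processed identically
theorem pvLine_eq (i : Int) (act : List Int) (d : PySem.Dict Int (List Int)) (cs : List Char) :
    pvALoop i act cs 0 d [] false = pvBLine i act d cs := by
  rw [pvALoop_eq_foldl, pvGTok_eq_acc act cs.length cs 0 (le_refl _), pvBLine, pvBLine_foldl]

theorem pvOuter_eq (am : PySem.Dict Int (List Int)) (lines : List String) :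
    ∀ (i : Int) (d : PySem.Dict Int (List Int)), pvAOuter am lines i d = pvBOuter am lines i d := by
  induction lines with
  | nil => intro i d; rfl
  | cons l ls ih =>
      intro i d
      simp only [pvAOuter, pvBOuter, pvLine_eq, ih]

-- ===== VERDICT (by name: the statement is the Claim_ definition above) =====
theorem findPartNr_spec : Claim_equal_findPartNr := by
  intro lines activeMatrix _ _
  unfold Spec_findPartNr findPartNr findPartNr_alt
  rw [pvOuter_eq]
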